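-- pv_equiv track=rewrite | github.com/gogotape/yandex_algorithms_5.0 | lesson2/task_I.py | calc_min_moves
-- ===== SOURCE A (Python) =====
-- def calc_min_moves(n: int, ships: list[tuple[int, int]]) -> int:
--
--     ships = list(sorted(ships, key=lambda x: x[0]))
--
--     sort_to_diff_rows = 0
--     new_ships = []
--     for i, ship in enumerate(ships, start=1):
--         x, y = ship
--         sort_to_diff_rows += abs(x - i)
--         new_ships.append((i, y))
--
--     possible_solutions = []
--     for column in range(1, n + 1):
--         solution = 0
--         for ship in new_ships:
--             x, y = ship
--             solution += abs(y - column)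
--
--         solution += sort_to_diff_rows
--         possible_solutions.append(solution)
--
--     return min(possible_solutions)
-- ===== SOURCE B (Python) =====
-- def calc_min_moves(n: int, ships: list[tuple[int, int]]) -> int:
--     xs = sorted(x for x, _ in ships)
--     rows = 0
--     for i, x in enumerate(xs, start=1):
--         rows += abs(x - i)
--     ys = [y for _, y in ships]
--     m = len(ys)
--     cnt = {}
--     for y in ys:
--         cnt[y] = cnt.get(y, 0) + 1
--     g = 0
--     le = 0
--     for y in ys:
--         g += abs(y - 1)
--         if y <= 1:
--             le += 1
--     best = g
--     c = 1
--     while c < n: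
--         g += 2 * le - m
--         c += 1
--         le += cnt.get(c, 0)
--         if g < best:
--             best = g
--     return best + rows
-- ===== Notes on version B (the rewrite author's own statement) =====
-- stated objective: faster
-- what changed: B replaces A's nested rescan of all ships for every candidate column by a counting sweep: the column cost at column 1 is computed once, then updated incrementally across columns 2..n via a value-count dictionary (cost(c+1) = cost(c) + #{y<=c} - #{y>c}), taking the running minimum.
-- outside the precondition, e.g. on calc_min_moves(0, [(1, 1)]): A raises ValueError, B returns 0
import Mathlib
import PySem

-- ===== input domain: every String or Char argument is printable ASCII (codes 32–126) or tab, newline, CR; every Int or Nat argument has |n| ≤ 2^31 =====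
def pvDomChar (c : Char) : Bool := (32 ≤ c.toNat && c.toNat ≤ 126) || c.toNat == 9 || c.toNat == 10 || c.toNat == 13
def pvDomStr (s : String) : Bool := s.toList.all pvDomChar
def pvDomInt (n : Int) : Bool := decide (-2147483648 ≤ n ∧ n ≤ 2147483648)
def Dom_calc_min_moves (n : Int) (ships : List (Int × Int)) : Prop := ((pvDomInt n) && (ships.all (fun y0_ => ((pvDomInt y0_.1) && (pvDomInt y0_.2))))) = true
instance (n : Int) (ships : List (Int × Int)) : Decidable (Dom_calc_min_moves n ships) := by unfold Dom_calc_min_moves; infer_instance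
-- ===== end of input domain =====

-- B replaces A's per-column rescan of all ships by an incremental counting sweep over the
-- columns (faster); equivalence is about the return value only.

-- ===== PORT A =====
def calc_min_moves (n : Int) (ships : List (Int × Int)) : Int :=
  let ships' := PySem.List.sorted ships (fun x => x.1) false
  let st := (PySem.List.enumerate ships' 1).foldl
    (fun (acc : Int × List (Int × Int)) p =>
      (acc.1 + |p.2.1 - p.1|, acc.2 ++ [(p.1, p.2.2)])) (0, [])
  let sortToDiffRows := st.1
  let newShips := st.2
  let possible := (PySem.List.pyRange 1 (n + 1) 1).foldl
    (fun acc column =>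
      acc ++ [newShips.foldl (fun s p => s + |p.2 - column|) 0 + sortToDiffRows]) []
  -- Python's min([]) raises ValueError; Pre_ requires 1 ≤ n so the list is nonempty
  (PySem.List.min? possible (fun x => x)).getD 0

-- ===== PORT B =====
-- the while-loop of Source B: runs while c < n, c increases by 1 each step, so (n-1).toNat steps
def pvBSweep (m : Int) (cnt : PySem.Dict Int Int) : Nat → Int → Int → Int → Int → Int
  | 0, _, _, _, best => best
  | fuel + 1, c, g, le, best =>
    let g' := g + 2 * le - m
    let c' := c + 1
    let le' := le + cnt.getD c' 0
    let best' := if g' < best then g' else best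
    pvBSweep m cnt fuel c' g' le' best'

def calc_min_moves_alt (n : Int) (ships : List (Int × Int)) : Int :=
  let xs := PySem.List.sorted (ships.map (·.1)) (fun x => x) false
  let rows := (PySem.List.enumerate xs 1).foldl (fun acc p => acc + |p.2 - p.1|) 0
  let ys := ships.map (·.2)
  let m : Int := ys.length
  let cnt := ys.foldl (fun d y => d.insert y (d.getD y 0 + 1)) PySem.Dict.empty
  let gle := ys.foldl (fun (p : Int × Int) y => (p.1 + |y - 1|, if y ≤ 1 then p.2 + 1 else p.2)) (0, 0)
  pvBSweep m cnt (n - 1).toNat 1 gle.1 gle.2 gle.1 + rows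

-- ===== PRECONDITION & SPEC =====
-- Pre_ excludes n < 1, where A's min() of an empty list of columns raises ValueError.
def Pre_calc_min_moves (n : Int) (ships : List (Int × Int)) : Prop := 1 ≤ n
instance (n : Int) (ships : List (Int × Int)) : Decidable (Pre_calc_min_moves n ships) := by unfold Pre_calc_min_moves; infer_instance
def pvWitness_calc_min_moves : Int × (List (Int × Int)) := (3, [(2, 1), (1, 3)])

def Spec_calc_min_moves (n : Int) (ships : List (Int × Int)) (out : Int) : Prop := out = calc_min_moves_alt n ships
instance (n : Int) (ships : List (Int × Int)) (out : Int) : Decidable (Spec_calc_min_moves n ships out) := by unfold Spec_calc_min_moves; infer_instance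

-- ===== CLAIM (what is proved, stated in full; the proofs are below) =====
def Claim_equal_calc_min_moves : Prop := ∀ (n : Int) (ships : List (Int × Int)), Dom_calc_min_moves n ships → Pre_calc_min_moves n ships → Spec_calc_min_moves n ships (calc_min_moves n ships)

-- ===== LEMMAS AND PROOFS =====

-- Σ_y |y - c| over a list of ints
def pvS (ys : List Int) (c : Int) : Int := (ys.map (fun y => |y - c|)).sum

-- the per-element recurrence: Σ|y-(c+1)| = Σ|y-c| + 2·#{y ≤ c} - |ys|
theorem pvS_succ (ys : List Int) (c : Int) :
    pvS ys (c + 1) = pvS ys c + 2 * (ys.countP (fun y => y ≤ c) : Int) - ys.length := by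
  induction ys with
  | nil => simp [pvS]
  | cons y t ih =>
    simp only [pvS, List.map_cons, List.sum_cons, List.countP_cons, List.length_cons] at *
    rw [ih]
    have habs : |y - (c + 1)| = |y - c| + (if y ≤ c then 1 else -1) := by
      by_cases h : y ≤ c
      · rw [if_pos h, abs_of_nonpos (by omega), abs_of_nonpos (by omega)]; ring
      · rw [if_neg h, abs_of_nonneg (by omega), abs_of_nonneg (by omega)]; ring
    rw [habs]
    by_cases h : y ≤ c <;> simp [h] <;> omega

theorem pvCountP_succ (ys : List Int) (c : Int) :
    ys.countP (fun y => y ≤ c + 1) = ys.countP (fun y => y ≤ c) + ys.count (c + 1) := by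
  induction ys with
  | nil => simp
  | cons y t ih =>
    simp only [List.countP_cons, List.count_cons, ih]
    by_cases h1 : y ≤ c + 1 <;> by_cases h2 : y ≤ c <;> by_cases h3 : y = c + 1 <;>
      simp [h1, h2, h3] <;> omega

-- the sweep computes the running min of pvS over columns c+1 .. c+fuel
theorem pvBSweep_spec (ys : List Int) (fuel : Nat) (c best : Int) :
    pvBSweep (ys.length : Int) (ys.foldl (fun d y => d.insert y (d.getD y 0 + 1)) PySem.Dict.empty)
        fuel c (pvS ys c) (ys.countP (fun y => y ≤ c) : Int) best
      = ((PySem.List.pyRange (c + 1) (c + 1 + fuel) 1).map (pvS ys)).foldl min best := by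
  induction fuel generalizing c best with
  | zero =>
    have h0 : PySem.List.pyRange (c + 1) (c + 1 + ((0 : Nat) : Int)) 1 = [] :=
      PySem.List.pyRange_one_eq_nil (by simp)
    rw [h0, pvBSweep]
    simp
  | succ k ih =>
    simp only [pvBSweep]
    have hcnt : (ys.foldl (fun d y => d.insert y (d.getD y 0 + 1)) PySem.Dict.empty).getD (c + 1) 0
        = (ys.count (c + 1) : Int) := by
      rw [PySem.Dict.foldl_insert_getD_add_one_eq_counter, PySem.Dict.getD_counter]
    have hg : pvS ys c + 2 * (ys.countP (fun y => y ≤ c) : Int) - ys.length = pvS ys (c + 1) :=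
      (pvS_succ ys c).symm
    have hle : (ys.countP (fun y => y ≤ c) : Int) + (ys.count (c + 1) : Int)
        = (ys.countP (fun y => y ≤ c + 1) : Int) := by
      rw [pvCountP_succ]; push_cast; ring
    have hrange : PySem.List.pyRange (c + 1) (c + 1 + ((k + 1 : Nat) : Int)) 1
        = (c + 1) :: PySem.List.pyRange (c + 1 + 1) (c + 1 + 1 + (k : Int)) 1 := by
      have h1 : ((k + 1 : Nat) : Int) = (k : Int) + 1 := by push_cast; ring
      rw [h1, show c + 1 + ((k : Int) + 1) = c + 1 + 1 + (k : Int) by ring]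
      rw [PySem.List.pyRange_one_cons (by omega)]
    simp only [hcnt, hg, hle]
    rw [ih (c + 1)]
    rw [hrange, List.map_cons, List.foldl_cons]
    congr 1
    simp only [min_def]; split_ifs <;> omega

-- a constant added under a running min comes out
theorem pvFoldlMin_add (r : List Int) (a K : Int) :
    (r.map (fun c => c + K)).foldl min (a + K) = r.foldl min a + K := by
  induction r generalizing a with
  | nil => simp
  | cons x t ih =>
    simp only [List.map_cons, List.foldl_cons]
    rw [show min (a + K) (x + K) = min a x + K by simp only [min_def]; split_ifs <;> omega, ih]

-- projecting the keys of a key-sorted pair list sorts the keys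
theorem pvMapFst_sorted (ships : List (Int × Int)) :
    (PySem.List.sorted ships (fun x => x.1) false).map (·.1)
      = PySem.List.sorted (ships.map (·.1)) (fun x => x) false := by
  have h := PySem.List.sorted_id_eq_of_perm_of_pairwise
    (ships.map (fun x => x.1))
    ((PySem.List.sorted ships (fun x => x.1) false).map (fun p => p.1))
    ((PySem.List.sorted_perm ships (fun x => x.1) false).map (fun p : Int × Int => p.1))
    (List.pairwise_map.mpr (PySem.List.sorted_pairwise ships (fun x => x.1)))
  exact h.symm

theorem pvEnumerate_map {α β : Type} (f : α → β) (l : List α) (s : Int) :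
    PySem.List.enumerate (l.map f) s = (PySem.List.enumerate l s).map (fun p => (p.1, f p.2)) := by
  induction l generalizing s with
  | nil => simp [PySem.List.enumerate_nil]
  | cons x t ih => simp [PySem.List.enumerate_cons, ih]

-- the two "rows" accumulators agree
theorem pvRows_eq (ships : List (Int × Int)) :
    (PySem.List.enumerate (PySem.List.sorted (ships.map (·.1)) (fun x => x) false) 1).foldl
        (fun acc p => acc + |p.2 - p.1|) 0
      = (PySem.List.enumerate (PySem.List.sorted ships (fun x => x.1) false) 1).foldl
        (fun acc p => acc + |p.2.1 - p.1|) 0 := by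
  rw [← pvMapFst_sorted, pvEnumerate_map]
  rw [List.foldl_map]

-- Σ over newShips' snd = Σ over the original ys (sums are permutation invariant)
theorem pvSolution_eq (ships : List (Int × Int)) (c : Int) :
    ((PySem.List.sorted ships (fun x => x.1) false).map (fun p => |p.2 - c|)).sum
      = pvS (ships.map (·.2)) c := by
  unfold pvS
  rw [List.map_map]
  exact List.Perm.sum_eq ((PySem.List.sorted_perm ships (fun x => x.1) false).map _)

-- ===== VERDICT (by name: the statement is the Claim_ definition above) =====
theorem calc_min_moves_spec : Claim_equal_calc_min_moves := by
  intro n ships _ hpre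
  unfold Pre_calc_min_moves at hpre
  unfold Spec_calc_min_moves
  simp only [calc_min_moves, calc_min_moves_alt]
  rw [PySem.List.foldl_prod_mk (f := fun acc (p : Int × Int × Int) => acc + |p.2.1 - p.1|)
      (g := fun acc (p : Int × Int × Int) => acc ++ [(p.1, p.2.2)])]
  rw [PySem.List.foldl_prod_mk (f := fun acc (y : Int) => acc + |y - 1|)
      (g := fun acc (y : Int) => if y ≤ 1 then acc + 1 else acc)]
  dsimp only
  rw [PySem.List.foldl_append_singleton_eq_map (f := fun p : Int × Int × Int => (p.1, p.2.2))]
  simp only [List.nil_append]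
  set ships' := PySem.List.sorted ships (fun x => x.1) false with hships'
  set ys := List.map (fun x : Int × Int => x.2) ships with hys
  set rows := List.foldl (fun acc (p : Int × Int × Int) => acc + |p.2.1 - p.1|) 0
      (PySem.List.enumerate ships' 1) with hrows
  rw [pvRows_eq]
  have hsol : ∀ c : Int,
      List.foldl (fun s (p : Int × Int) => s + |p.2 - c|) 0
        ((PySem.List.enumerate ships' 1).map (fun p => (p.1, p.2.2)))
      = pvS ys c := by
    intro c
    rw [PySem.List.foldl_add (l := (PySem.List.enumerate ships' 1).map (fun p => (p.1, p.2.2)))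
        (g := fun p : Int × Int => |p.2 - c|) 0]
    rw [List.map_map]
    have h2 : ((PySem.List.enumerate ships' 1).map
          ((fun p : Int × Int => |p.2 - c|) ∘ (fun p : Int × Int × Int => (p.1, p.2.2))))
        = ships'.map (fun p => |p.2 - c|) := by
      have h3 : ((fun p : Int × Int => |p.2 - c|) ∘ (fun p : Int × Int × Int => (p.1, p.2.2)))
          = (fun p : Int × Int => |p.2 - c|) ∘ (fun p : Int × Int × Int => p.2) := rfl
      rw [h3, ← List.map_map, PySem.List.map_snd_enumerate]
    rw [h2, hships', pvSolution_eq, hys]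
    ring_nf
  have hcons : PySem.List.pyRange 1 (n + 1) 1 = 1 :: PySem.List.pyRange 2 (n + 1) 1 :=
    PySem.List.pyRange_one_cons (by omega)
  rw [hcons]
  rw [PySem.List.foldl_append_singleton_eq_map
      (f := fun column => List.foldl (fun s (p : Int × Int) => s + |p.2 - column|) 0
        ((PySem.List.enumerate ships' 1).map (fun p => (p.1, p.2.2))) + rows)]
  rw [List.nil_append, List.map_cons, PySem.List.min?_id_cons, Option.getD_some, hsol 1]
  have hmapped : (PySem.List.pyRange 2 (n + 1) 1).map
      (fun column => List.foldl (fun s (p : Int × Int) => s + |p.2 - column|) 0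
        ((PySem.List.enumerate ships' 1).map (fun p => (p.1, p.2.2))) + rows)
      = ((PySem.List.pyRange 2 (n + 1) 1).map (pvS ys)).map (fun v => v + rows) := by
    rw [List.map_map]
    exact List.map_congr_left (fun c _ => by rw [hsol c]; rfl)
  rw [hmapped]
  have hg1 : List.foldl (fun acc (y : Int) => acc + |y - 1|) 0 ys = pvS ys 1 := by
    rw [PySem.List.foldl_add (l := ys) (g := fun y : Int => |y - 1|) 0]
    simp [pvS]
  have hle1 : List.foldl (fun acc (y : Int) => if y ≤ 1 then acc + 1 else acc) 0 ys
      = ((ys.countP (fun y => y ≤ 1) : Nat) : Int) := by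
    rw [PySem.List.foldl_ite_add_one (p := fun y : Int => y ≤ 1)]
    ring
  rw [hg1, hle1, pvBSweep_spec ys ((n - 1).toNat) 1]
  rw [show (1 : Int) + 1 + (((n - 1).toNat : Nat) : Int) = n + 1 by omega]
  rw [show (1 : Int) + 1 = 2 by norm_num]
  rw [pvFoldlMin_add]
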